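-- pv_equiv track=rewrite | github.com/mxtchell/template_skills_v1 | market_share_breakdown.py | get_driver_metrics
-- ===== SOURCE A (Python) =====
-- def get_driver_metrics(decomposition_display_config):
--     """Get the metrics to calculate impacts for, decomposition metrics, and token metrics to display in the table"""
--
--     decomp_metrics_names = []  # metrics to display in decomposition table
--     impact_metric_names = []  # impact metrics used for impact calculations
--     token_metrics = []  # custom metrics that are displayed in the table
--     if decomposition_display_config:
--         for section in decomposition_display_config:
--             for metric, display_metrics in decomposition_display_config[section].items():
--                 if 'impact' in display_metrics:
--                     impact_metric_names.append(metric)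
--                 elif metric == '__token__':
--                     token_metrics.append(display_metrics)
--                 else:
--                     decomp_metrics_names.append(metric)
--
--     return decomp_metrics_names, impact_metric_names, token_metrics
-- ===== SOURCE B (Python) =====
-- def get_driver_metrics(decomposition_display_config):
--     """Get the metrics to calculate impacts for, decomposition metrics, and token metrics to display in the table"""
--     pairs = [item
--              for section_metrics in (decomposition_display_config or {}).values()
--              for item in section_metrics.items()]
--     decomp_metrics_names = [m for m, dm in pairs if 'impact' not in dm and m != '__token__']
--     impact_metric_names = [m for m, dm in pairs if 'impact' in dm]
--     token_metrics = [dm for m, dm in pairs if 'impact' not in dm and m == '__token__']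
--     return decomp_metrics_names, impact_metric_names, token_metrics
-- ===== Notes on version B (the rewrite author's own statement) =====
-- stated objective: simpler
-- what changed: Flattens the two-level config into one sequence of (metric, display_metrics) pairs and builds each of the three result lists with its own filtered comprehension, instead of one stateful loop with an if/elif/else appending to three accumulators (it also drops A's lookup of config[section] while iterating the keys).
import Mathlib
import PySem

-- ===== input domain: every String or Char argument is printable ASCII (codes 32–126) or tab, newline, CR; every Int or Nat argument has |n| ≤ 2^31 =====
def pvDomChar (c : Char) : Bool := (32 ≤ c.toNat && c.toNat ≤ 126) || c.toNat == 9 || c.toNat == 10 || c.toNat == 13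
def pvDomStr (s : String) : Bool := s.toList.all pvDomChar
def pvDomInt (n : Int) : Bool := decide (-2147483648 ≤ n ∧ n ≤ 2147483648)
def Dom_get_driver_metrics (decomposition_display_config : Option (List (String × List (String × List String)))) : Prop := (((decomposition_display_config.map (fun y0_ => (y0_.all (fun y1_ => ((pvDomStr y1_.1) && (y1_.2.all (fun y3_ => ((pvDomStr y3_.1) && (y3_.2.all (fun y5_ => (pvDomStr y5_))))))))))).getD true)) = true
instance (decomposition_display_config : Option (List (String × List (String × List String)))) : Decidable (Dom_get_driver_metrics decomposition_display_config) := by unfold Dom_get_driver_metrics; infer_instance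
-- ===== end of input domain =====

-- B flattens the config into one pair sequence and builds each result list with its own
-- filtered comprehension, instead of A's single if/elif/else loop over three accumulators (objective: simpler).

-- ===== PORT A =====
-- inner 'for metric, display_metrics in ….items():' loop of A, over the three accumulators
def gdmInner (acc : List String × List String × List (List String))
    (items : List (String × List String)) : List String × List String × List (List String) :=
  items.foldl (fun acc p =>
    if p.2.contains "impact" then (acc.1, acc.2.1 ++ [p.1], acc.2.2)
    else if p.1 = "__token__" then (acc.1, acc.2.1, acc.2.2 ++ [p.2])
    else (acc.1 ++ [p.1], acc.2.1, acc.2.2)) acc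

def get_driver_metrics (decomposition_display_config : Option (List (String × List (String × List String)))) : List String × List String × List (List String) :=
  match decomposition_display_config with
  | none => ([], [], [])                       -- 'if decomposition_display_config:' falsy (None)
  | some l =>
    if l.isEmpty then ([], [], [])             -- falsy (empty dict)
    else
      -- 'for section in …: for metric, display_metrics in …[section].items():'
      -- …[section] = first match by key (exact for a Python dict, whose keys are unique)
      l.foldl (fun acc sec =>
        gdmInner acc (((l.find? (fun q => q.1 == sec.1)).map Prod.snd).getD [])) ([], [], [])

-- ===== PORT B =====
def get_driver_metrics_alt (decomposition_display_config : Option (List (String × List (String × List String)))) : List String × List String × List (List String) :=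
  let pairs := (decomposition_display_config.getD []).flatMap Prod.snd
  ((pairs.filter (fun p => !p.2.contains "impact" && p.1 != "__token__")).map Prod.fst,
   (pairs.filter (fun p => p.2.contains "impact")).map Prod.fst,
   (pairs.filter (fun p => !p.2.contains "impact" && p.1 == "__token__")).map Prod.snd)

-- ===== PRECONDITION & SPEC =====
-- Pre_ excludes association lists with duplicate section keys: they do not correspond to any
-- Python dict (dict keys are unique), so A's behaviour there is no dict's behaviour.
def Pre_get_driver_metrics (decomposition_display_config : Option (List (String × List (String × List String)))) : Prop :=
  ((decomposition_display_config.getD []).map Prod.fst).Nodup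
instance (decomposition_display_config : Option (List (String × List (String × List String)))) : Decidable (Pre_get_driver_metrics decomposition_display_config) := by unfold Pre_get_driver_metrics; infer_instance

def pvWitness_get_driver_metrics : (Option (List (String × List (String × List String)))) :=
  some [("s", [("a", ["impact"]), ("__token__", ["t"]), ("b", [])])]

def Spec_get_driver_metrics (decomposition_display_config : Option (List (String × List (String × List String)))) (out : List String × List String × List (List String)) : Prop := out = get_driver_metrics_alt decomposition_display_config
instance (decomposition_display_config : Option (List (String × List (String × List String)))) (out : List String × List String × List (List String)) : Decidable (Spec_get_driver_metrics decomposition_display_config out) := by unfold Spec_get_driver_metrics; infer_instance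

-- ===== CLAIM (what is proved, stated in full; the proofs are below) =====
def Claim_equal_get_driver_metrics : Prop := ∀ (decomposition_display_config : Option (List (String × List (String × List String)))), Dom_get_driver_metrics decomposition_display_config → Pre_get_driver_metrics decomposition_display_config → Spec_get_driver_metrics decomposition_display_config (get_driver_metrics decomposition_display_config)

-- ===== LEMMAS AND PROOFS =====

-- the three category lists B extracts from a pair sequence
def gdmD (ps : List (String × List String)) : List String :=
  (ps.filter (fun p => !p.2.contains "impact" && p.1 != "__token__")).map Prod.fst
def gdmI (ps : List (String × List String)) : List String :=
  (ps.filter (fun p => p.2.contains "impact")).map Prod.fst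
def gdmT (ps : List (String × List String)) : List (List String) :=
  (ps.filter (fun p => !p.2.contains "impact" && p.1 == "__token__")).map Prod.snd

theorem gdmInner_eq (items : List (String × List String)) :
    ∀ acc, gdmInner acc items = (acc.1 ++ gdmD items, acc.2.1 ++ gdmI items, acc.2.2 ++ gdmT items) := by
  induction items with
  | nil => intro acc; simp [gdmInner, gdmD, gdmI, gdmT]
  | cons p rest ih =>
    intro acc
    simp only [gdmInner, List.foldl_cons] at *
    split_ifs with h1 h2 <;>
      simp_all [gdmD, gdmI, gdmT, List.filter_cons, h1] <;> simp_all

theorem find_self {l : List (String × List (String × List String))}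
    (hnd : (l.map Prod.fst).Nodup) :
    ∀ p ∈ l, l.find? (fun q => q.1 == p.1) = some p := by
  induction l with
  | nil => intro p hp; simp at hp
  | cons q rest ih =>
    intro p hp
    simp only [List.map_cons, List.nodup_cons] at hnd
    rcases List.mem_cons.mp hp with rfl | hmem
    · simp [List.find?_cons]
    · have hne : ¬ (q.1 == p.1) = true := by
        simp only [beq_iff_eq]
        intro h
        exact hnd.1 (h ▸ List.mem_map_of_mem hmem)
      simp [List.find?_cons, hne, ih hnd.2 p hmem]

theorem outer_eq (l : List (String × List (String × List String)))
    (m : List (String × List (String × List String)))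
    (hfind : ∀ p ∈ m, l.find? (fun q => q.1 == p.1) = some p) :
    ∀ acc, m.foldl (fun acc sec =>
        gdmInner acc (((l.find? (fun q => q.1 == sec.1)).map Prod.snd).getD [])) acc
      = (acc.1 ++ gdmD (m.flatMap Prod.snd), acc.2.1 ++ gdmI (m.flatMap Prod.snd),
         acc.2.2 ++ gdmT (m.flatMap Prod.snd)) := by
  induction m with
  | nil => intro acc; simp [gdmD, gdmI, gdmT]
  | cons sec rest ih =>
    intro acc
    have hsec := hfind sec (List.mem_cons_self ..)
    have hrest : ∀ p ∈ rest, l.find? (fun q => q.1 == p.1) = some p :=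
      fun p hp => hfind p (List.mem_cons_of_mem _ hp)
    rw [List.foldl_cons,
      show ((l.find? (fun q => q.1 == sec.1)).map Prod.snd).getD [] = sec.2 by rw [hsec]; rfl,
      gdmInner_eq, ih hrest]
    simp [gdmD, gdmI, gdmT, List.filter_append, List.flatMap_cons]

-- ===== VERDICT (by name: the statement is the Claim_ definition above) =====
theorem get_driver_metrics_spec : Claim_equal_get_driver_metrics := by
  intro cfg _ hpre
  unfold Spec_get_driver_metrics
  match cfg with
  | none => rfl
  | some l =>
    simp only [Pre_get_driver_metrics, Option.getD_some] at hpre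
    by_cases hl : l.isEmpty
    · rw [List.isEmpty_iff] at hl
      subst hl; rfl
    · simp only [get_driver_metrics, hl, if_false,
        outer_eq l l (find_self hpre), get_driver_metrics_alt]
      simp [gdmD, gdmI, gdmT]
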